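-- pv_equiv track=rewrite | github.com/mrigankas1993/ENCRYPTION | password file1.py | distinct_password
-- ===== SOURCE A (Python) =====
-- from itertools import combinations
--
-- def distinct_password(input1, input2):
--     combination = list(combinations(input2, 2))
--     distinct = input1
--     for j in combination:
--         length = len(j[0])
--         password = list(j[0])
--         for i in range(length - 2):
--             password[i], password[i + 2] = password[i + 2], password[i]
--             if password == list(j[1]):
--                 distinct -= 1
--                 break
--     return distinct
-- ===== SOURCE B (Python) =====
-- def distinct_password(input1, input2):
--     def reachable(s):
--         p = list(s)
--         out = set()
--         for i in range(len(p) - 2):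
--             p[i], p[i + 2] = p[i + 2], p[i]
--             out.add(''.join(p))
--         return out
--     remaining = {}
--     for s in input2:
--         remaining[s] = remaining.get(s, 0) + 1
--     distinct = input1
--     for s in input2:
--         remaining[s] -= 1
--         distinct -= sum(remaining.get(t, 0) for t in reachable(s))
--     return distinct
-- ===== Notes on version B (the rewrite author's own statement) =====
-- stated objective: faster
-- what changed: Instead of scanning all O(n^2) pairs and re-running the swap sequence per pair, B computes each string's set of swap-reachable strings once and counts later matching occurrences via a dict of remaining multiplicities in a single pass.
import Mathlib
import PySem

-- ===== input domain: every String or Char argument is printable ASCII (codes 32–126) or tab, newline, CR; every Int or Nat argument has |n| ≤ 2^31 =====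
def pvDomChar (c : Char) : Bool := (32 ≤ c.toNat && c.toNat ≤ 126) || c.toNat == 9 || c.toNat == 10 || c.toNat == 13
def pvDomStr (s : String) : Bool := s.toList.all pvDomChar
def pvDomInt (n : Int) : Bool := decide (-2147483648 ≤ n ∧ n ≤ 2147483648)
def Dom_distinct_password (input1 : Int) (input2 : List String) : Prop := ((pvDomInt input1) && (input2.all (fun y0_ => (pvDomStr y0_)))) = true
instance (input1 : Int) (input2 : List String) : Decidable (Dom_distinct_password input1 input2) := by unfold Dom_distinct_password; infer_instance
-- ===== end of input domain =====

-- B replaces A's loop over all pairs by a single pass that precomputes each string's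
-- reachable set once and counts later matches through a dict of remaining multiplicities.

-- ===== PORT A =====
-- the simultaneous swap 'password[i], password[i+2] = password[i+2], password[i]' (indices in range)
def pvSwap (p : List Char) (i : Nat) : List Char :=
  (p.set i (p.getD (i + 2) ' ')).set (i + 2) (p.getD i ' ')

-- A's inner 'for i in range(length - 2)' with the break-on-match
def pvMatchLoop (target : List Char) (p : List Char) (i stop : Nat) : Bool :=
  if _h : i < stop then
    let p' := pvSwap p i
    if p' = target then true else pvMatchLoop target p' (i + 1) stop
  else false
termination_by stop - i

def distinct_password (input1 : Int) (input2 : List String) : Int :=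
  let combination := PySem.List.combinations input2 2
  combination.foldl (fun distinct j =>
    let a := PySem.List.pyGetD j 0 ""
    let b := PySem.List.pyGetD j 1 ""
    if pvMatchLoop b.toList a.toList 0 (a.toList.length - 2) then distinct - 1 else distinct)
    input1

-- ===== PORT B =====
-- B's inner loop: collect every string produced by the successive swaps into a set
def pvReachLoop (p : List Char) (i stop : Nat) (out : PySem.Set String) : PySem.Set String :=
  if _h : i < stop then
    let p' := pvSwap p i
    pvReachLoop p' (i + 1) stop (PySem.Set.add out (String.ofList p'))
  else out
termination_by stop - i

def pvReachable (s : String) : PySem.Set String :=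
  pvReachLoop s.toList 0 (s.toList.length - 2) PySem.Set.empty

def distinct_password_alt (input1 : Int) (input2 : List String) : Int :=
  let remaining := input2.foldl (fun d s => d.insert s (d.getD s 0 + 1)) PySem.Dict.empty
  (input2.foldl (fun (st : PySem.Dict String Int × Int) s =>
      let rem := st.1.insert s (st.1.getD s 0 - 1)
      (rem, st.2 - ((pvReachable s).map (fun t => rem.getD t 0)).sum))
    (remaining, input1)).2

-- ===== PRECONDITION & SPEC =====
def Spec_distinct_password (input1 : Int) (input2 : List String) (out : Int) : Prop := out = distinct_password_alt input1 input2
instance (input1 : Int) (input2 : List String) (out : Int) : Decidable (Spec_distinct_password input1 input2 out) := by unfold Spec_distinct_password; infer_instance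

-- ===== CLAIM (what is proved, stated in full; the proofs are below) =====
def Claim_equal_distinct_password : Prop := ∀ (input1 : Int) (input2 : List String), Dom_distinct_password input1 input2 → Spec_distinct_password input1 input2 (distinct_password input1 input2)

-- ===== LEMMAS AND PROOFS =====

-- the raw sequence of strings generated by the successive swaps
def pvSeq (p : List Char) (i stop : Nat) : List String :=
  if _h : i < stop then
    let p' := pvSwap p i
    String.ofList p' :: pvSeq p' (i + 1) stop
  else []
termination_by stop - i

-- the number of pairs i < j with input2[j] reachable from input2[i]
def pvM : List String → Int
  | [] => 0
  | x :: xs => (xs.countP (fun y => decide (y ∈ pvReachable x)) : Int) + pvM xs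

theorem pvMatchLoop_eq_mem (target p : List Char) (i stop : Nat) :
    pvMatchLoop target p i stop = true ↔ String.ofList target ∈ pvSeq p i stop := by
  rw [pvMatchLoop, pvSeq]
  split_ifs with h
  · by_cases he : pvSwap p i = target
    · subst he
      simp
    · have hne : String.ofList target ≠ String.ofList (pvSwap p i) := by
        intro hh
        exact he (String.ofList_inj.mp hh).symm
      simp only [List.mem_cons]
      rw [if_neg he, pvMatchLoop_eq_mem target (pvSwap p i) (i + 1) stop]
      simp [hne]
  · simp
termination_by stop - i

theorem mem_pvReachLoop (p : List Char) (i stop : Nat) (out : PySem.Set String) (x : String) :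
    x ∈ pvReachLoop p i stop out ↔ x ∈ out ∨ x ∈ pvSeq p i stop := by
  rw [pvReachLoop, pvSeq]
  split_ifs with h
  · rw [mem_pvReachLoop (pvSwap p i) (i + 1) stop _ x]
    simp only [PySem.Set.mem_add, List.mem_cons]
    tauto
  · simp
termination_by stop - i

theorem nodup_pvReachLoop (p : List Char) (i stop : Nat) (out : PySem.Set String)
    (h : out.Nodup) : (pvReachLoop p i stop out).Nodup := by
  rw [pvReachLoop]
  split_ifs with hi
  · exact nodup_pvReachLoop _ _ _ _ (PySem.Set.nodup_add _ _ h)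
  · exact h
termination_by stop - i

theorem match_eq (x y : String) :
    pvMatchLoop y.toList x.toList 0 (x.toList.length - 2) = decide (y ∈ pvReachable x) := by
  rw [Bool.eq_iff_iff, decide_eq_true_iff, pvMatchLoop_eq_mem]
  unfold pvReachable
  rw [mem_pvReachLoop]
  simp [PySem.Set.empty, String.ofList_toList]

theorem foldl_if_sub_one {α : Type} (p : α → Bool) (l : List α) (a : Int) :
    l.foldl (fun d y => if p y then d - 1 else d) a = a - (l.countP p : Int) := by
  induction l generalizing a with
  | nil => simp
  | cons x xs ih =>
    simp only [List.foldl_cons, List.countP_cons]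
    by_cases hp : p x
    · rw [if_pos hp, ih]
      simp [hp]
      omega
    · rw [if_neg hp, ih]
      simp [hp]
  
theorem a_eq (input1 : Int) (input2 : List String) :
    distinct_password input1 input2 = input1 - pvM input2 := by
  induction input2 generalizing input1 with
  | nil => simp [distinct_password, pvM, PySem.List.combinations_nil_succ]
  | cons x xs ih =>
    unfold distinct_password
    have hc : PySem.List.combinations (x :: xs) 2
        = (PySem.List.combinations xs 1).map (x :: ·) ++ PySem.List.combinations xs 2 :=
      PySem.List.combinations_cons_succ x xs 1
    rw [hc, PySem.List.combinations_one, List.foldl_append, List.map_map, List.foldl_map]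
    have hstep : ∀ z : Int,
        xs.foldl (fun distinct y =>
          (fun distinct j =>
            let a := PySem.List.pyGetD j 0 ""
            let b := PySem.List.pyGetD j 1 ""
            if pvMatchLoop b.toList a.toList 0 (a.toList.length - 2) then distinct - 1 else distinct)
          distinct (((x :: ·) ∘ fun y => [y]) y)) z
        = z - (xs.countP (fun y => decide (y ∈ pvReachable x)) : Int) := by
      intro z
      have : ∀ (d : Int) (y : String),
          (fun distinct j =>
            let a := PySem.List.pyGetD j 0 ""
            let b := PySem.List.pyGetD j 1 ""
            if pvMatchLoop b.toList a.toList 0 (a.toList.length - 2) then distinct - 1 else distinct)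
          d (((x :: ·) ∘ fun y => [y]) y)
          = if decide (y ∈ pvReachable x) then d - 1 else d := by
        intro d y
        have e0 : PySem.List.pyGetD [x, y] 0 "" = x := rfl
        have e1 : PySem.List.pyGetD [x, y] 1 "" = y := rfl
        simp only [Function.comp_apply, e0, e1, match_eq]
      simp only [this]
      exact foldl_if_sub_one _ xs z
    rw [hstep input1]
    have houter : ∀ z : Int,
        (PySem.List.combinations xs 2).foldl (fun distinct j =>
          let a := PySem.List.pyGetD j 0 ""
          let b := PySem.List.pyGetD j 1 ""
          if pvMatchLoop b.toList a.toList 0 (a.toList.length - 2) then distinct - 1 else distinct) z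
        = distinct_password z xs := fun z => rfl
    rw [houter, ih]
    simp only [pvM]
    ring

theorem countP_cons_mem (a : String) (ts : List String) (ha : a ∉ ts) (l : List String) :
    l.countP (fun y => decide (y ∈ a :: ts)) = l.count a + l.countP (fun y => decide (y ∈ ts)) := by
  induction l with
  | nil => simp
  | cons y l ih =>
    simp only [List.countP_cons, List.count_cons, ih]
    by_cases hy : y = a
    · subst hy
      have hts : (y ∈ ts) = False := by simp [ha]
      simp [List.mem_cons, hts]
      omega
    · have hya : (y = a) = False := by simp [hy]
      by_cases ht : y ∈ ts <;> simp [List.mem_cons, hya, ht] <;> omega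

theorem sum_counts (ts : List String) (hn : ts.Nodup) (l : List String) :
    (ts.map (fun t => (l.count t : Int))).sum
      = (l.countP (fun y => decide (y ∈ ts)) : Int) := by
  induction ts with
  | nil => simp
  | cons a ts ih =>
    rcases List.nodup_cons.mp hn with ⟨ha, hn'⟩
    rw [List.map_cons, List.sum_cons, ih hn', countP_cons_mem a ts ha l]
    push_cast
    ring

theorem b_fold (l : List String) (rem : PySem.Dict String Int) (d : Int)
    (h : ∀ t, rem.getD t 0 = (l.count t : Int)) :
    (l.foldl (fun (st : PySem.Dict String Int × Int) s =>
        let rem := st.1.insert s (st.1.getD s 0 - 1)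
        (rem, st.2 - ((pvReachable s).map (fun t => rem.getD t 0)).sum)) (rem, d)).2
      = d - pvM l := by
  induction l generalizing rem d with
  | nil => simp [pvM]
  | cons s rest ih =>
    have h1 : ∀ t, (rem.insert s (rem.getD s 0 - 1)).getD t 0 = (rest.count t : Int) := by
      intro t
      rw [PySem.Dict.getD_insert]
      by_cases ht : t = s
      · subst ht
        rw [if_pos rfl, h t]
        simp
      · rw [if_neg ht, h t]
        simp [Ne.symm ht]
    rw [List.foldl_cons]
    show (List.foldl (fun (st : PySem.Dict String Int × Int) s =>
        let rem := st.1.insert s (st.1.getD s 0 - 1)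
        (rem, st.2 - ((pvReachable s).map (fun t => rem.getD t 0)).sum))
        (rem.insert s (rem.getD s 0 - 1),
         d - ((pvReachable s).map (fun t => (rem.insert s (rem.getD s 0 - 1)).getD t 0)).sum) rest).2
      = d - pvM (s :: rest)
    rw [ih _ _ h1]
    have hmap : (pvReachable s).map (fun t => (rem.insert s (rem.getD s 0 - 1)).getD t 0)
        = (pvReachable s).map (fun t => (rest.count t : Int)) :=
      List.map_congr_left (fun t _ => h1 t)
    have hnd : (pvReachable s).Nodup := nodup_pvReachLoop _ _ _ _ List.nodup_nil
    rw [hmap, sum_counts _ hnd rest]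
    simp only [pvM]
    ring

theorem b_eq (input1 : Int) (input2 : List String) :
    distinct_password_alt input1 input2 = input1 - pvM input2 := by
  have hrem : ∀ t, (input2.foldl (fun d s => d.insert s (d.getD s 0 + 1))
      (PySem.Dict.empty : PySem.Dict String Int)).getD t 0 = (input2.count t : Int) := by
    intro t
    rw [PySem.Dict.foldl_insert_getD_add_one_eq_counter, PySem.Dict.getD_counter]
  exact b_fold input2 _ input1 hrem

-- ===== VERDICT (by name: the statement is the Claim_ definition above) =====
theorem distinct_password_spec : Claim_equal_distinct_password := by
  intro input1 input2 _
  unfold Spec_distinct_password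
  rw [a_eq, b_eq]
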